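-- pv_equiv track=rewrite | github.com/Shiv2157k/LeetCode2024 | microsoft_may_redo/greedy/MinimumNumberOfFoodBucketsToFeedHamsters.py | minimum_food_buckets
-- ===== SOURCE A (Python) =====
-- def minimum_food_buckets(hamsters: str) -> int:
--     """
--     Approach: Greedy
--     T: O(N)
--     S: O(1)
--     :param hamsters:
--     :return:
--     """
--
--     bucket_count = 0
--     pointer = 0
--     length = len(hamsters)
--
--     while pointer < length:
--
--         if hamsters[pointer] == 'H':
--
--             # case 1: always add a bucket on to right if there is space
--             if pointer + 1 < length and hamsters[pointer + 1] == '.':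
--                 bucket_count += 1
--                 pointer += 2
--             # case 2: no buckets on the left then add there is space
--             elif pointer > 0 and hamsters[pointer - 1] == '.':
--                 bucket_count += 1
--             else:  # no space to place a bucket
--                 return -1
--         pointer += 1
--     return bucket_count
-- ===== SOURCE B (Python) =====
-- def minimum_food_buckets(hamsters: str) -> int:
--     # feasibility: every hamster must have an empty cell on at least one side
--     n = len(hamsters)
--     for i, c in enumerate(hamsters):
--         if c == 'H':
--             left_ok = i > 0 and hamsters[i - 1] == '.'
--             right_ok = i + 1 < n and hamsters[i + 1] == '.'
--             if not (left_ok or right_ok):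
--                 return -1
--     # each non-overlapping 'H.H' pattern lets two hamsters share one bucket
--     shared = 0
--     i = 0
--     while i < n:
--         if hamsters[i:i + 3] == 'H.H':
--             shared += 1
--             i += 3
--         else:
--             i += 1
--     return hamsters.count('H') - shared
-- ===== Notes on version B (the rewrite author's own statement) =====
-- stated objective: alternative
-- what changed: Replaces the fused right-preference pointer walk by a validate-then-count decomposition: first a feasibility scan checking each hamster has an adjacent empty cell, then the hamster count minus the number of non-overlapping hamster-gap-hamster triples found by a left-to-right skip-3 scan.
import Mathlib
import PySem

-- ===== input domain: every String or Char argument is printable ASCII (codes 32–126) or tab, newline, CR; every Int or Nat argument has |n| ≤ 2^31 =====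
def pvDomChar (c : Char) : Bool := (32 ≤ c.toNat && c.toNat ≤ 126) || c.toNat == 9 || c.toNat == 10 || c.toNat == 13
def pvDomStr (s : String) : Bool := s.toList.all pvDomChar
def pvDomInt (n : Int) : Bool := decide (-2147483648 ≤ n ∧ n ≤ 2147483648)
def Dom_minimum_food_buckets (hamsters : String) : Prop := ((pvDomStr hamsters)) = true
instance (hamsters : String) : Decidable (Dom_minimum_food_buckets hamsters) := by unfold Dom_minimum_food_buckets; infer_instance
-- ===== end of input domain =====

-- B replaces A's fused right-preference pointer walk by a validate-then-count
-- decomposition (feasibility scan, then hamster count minus non-overlapping shareable triples);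
-- same O(n) cost, different algorithm (objective: alternative).

-- ===== PORT A =====
-- A's while loop as a recursion over the suffix at `pointer`;
-- `prev` is the character at pointer-1 (none at the start).
def pvLoopA (prev : Option Char) (l : List Char) (b : Int) : Int :=
  match l with
  | [] => b
  | c :: t =>
    if c = 'H' then
      match t with
      | d :: t2 =>
        if d = '.' then
          -- bucket on the right, pointer += 3
          match t2 with
          | [] => b + 1
          | e :: t3 => pvLoopA (some e) t3 (b + 1)
        else if prev = some '.' then pvLoopA (some c) (d :: t2) (b + 1)
        else -1
      | [] => if prev = some '.' then b + 1 else -1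
    else pvLoopA (some c) t b
termination_by l.length
decreasing_by all_goals simp <;> omega

def minimum_food_buckets (hamsters : String) : Int :=
  pvLoopA none hamsters.toList 0

-- ===== PORT B =====
-- feasibility scan of Source B: each hamster must have an empty neighbour
def pvFeasB (prev : Option Char) (l : List Char) : Bool :=
  match l with
  | [] => true
  | c :: t =>
    if c = 'H' then
      (decide (prev = some '.') || decide (t.head? = some '.')) && pvFeasB (some c) t
    else pvFeasB (some c) t

-- hamsters.count('H')
def pvCountH (l : List Char) : Int :=
  match l with
  | [] => 0
  | c :: t => (if c = 'H' then 1 else 0) + pvCountH t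

-- the while loop of Source B: non-overlapping shareable triples, advance 3 on a match else 1
def pvPatterns (l : List Char) : Int :=
  match l with
  | [] => 0
  | [_] => 0
  | [_, _] => 0
  | c :: d :: e :: t =>
    if c = 'H' ∧ d = '.' ∧ e = 'H' then 1 + pvPatterns t
    else pvPatterns (d :: e :: t)

def minimum_food_buckets_alt (hamsters : String) : Int :=
  if pvFeasB none hamsters.toList then
    pvCountH hamsters.toList - pvPatterns hamsters.toList
  else -1

-- ===== PRECONDITION & SPEC =====
def Spec_minimum_food_buckets (hamsters : String) (out : Int) : Prop := out = minimum_food_buckets_alt hamsters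
instance (hamsters : String) (out : Int) : Decidable (Spec_minimum_food_buckets hamsters out) := by unfold Spec_minimum_food_buckets; infer_instance

-- ===== CLAIM (what is proved, stated in full; the proofs are below) =====
def Claim_equal_minimum_food_buckets : Prop := ∀ (hamsters : String), Dom_minimum_food_buckets hamsters → Spec_minimum_food_buckets hamsters (minimum_food_buckets hamsters)

-- ===== LEMMAS AND PROOFS =====

theorem pat_cons_ne (c : Char) (t : List Char) (h : c ≠ 'H') :
    pvPatterns (c :: t) = pvPatterns t := by
  match t with
  | [] => simp [pvPatterns]
  | [d] => simp [pvPatterns]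
  | d :: e :: t' => simp [pvPatterns, h]

theorem pat_H_nodot (t : List Char) (h : t.head? ≠ some '.') :
    pvPatterns ('H' :: t) = pvPatterns t := by
  match t with
  | [] => simp [pvPatterns]
  | [d] => simp [pvPatterns]
  | d :: e :: t' =>
    have hd : d ≠ '.' := by simpa using h
    simp [pvPatterns, hd]

theorem pat_Hdot_ne (e : Char) (t3 : List Char) (h : e ≠ 'H') :
    pvPatterns ('H' :: '.' :: e :: t3) = pvPatterns t3 := by
  rw [show pvPatterns ('H' :: '.' :: e :: t3) = pvPatterns ('.' :: e :: t3) by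
        simp [pvPatterns, h]]
  rw [pat_cons_ne _ _ (by decide), pat_cons_ne _ _ h]

theorem pvKeyAux : ∀ (n : Nat) (l : List Char), l.length ≤ n →
    ∀ (prev : Option Char) (b : Int),
    pvLoopA prev l b = if pvFeasB prev l then b + (pvCountH l - pvPatterns l) else -1 := by
  intro n
  induction n with
  | zero =>
    intro l hl prev b
    match l with
    | [] => simp [pvLoopA, pvFeasB, pvCountH, pvPatterns]
    | c :: t => simp at hl
  | succ n ih =>
    intro l hl prev b
    match l with
    | [] => simp [pvLoopA, pvFeasB, pvCountH, pvPatterns]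
    | c :: t =>
      by_cases hc : c = 'H'
      · subst hc
        match t with
        | [] =>
          by_cases hp : prev = some '.' <;>
            simp [pvLoopA, pvFeasB, pvCountH, pvPatterns, hp]
        | d :: t2 =>
          by_cases hd : d = '.'
          · subst hd
            match t2 with
            | [] =>
              simp [pvLoopA, pvFeasB, pvCountH, pvPatterns]
            | e :: t3 =>
              have hlen : t3.length ≤ n := by simp at hl; omega
              have hrec := ih t3 hlen (some e) (b + 1)
              rw [show pvLoopA prev ('H' :: '.' :: e :: t3) b
                    = pvLoopA (some e) t3 (b + 1) by simp [pvLoopA]]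
              rw [hrec]
              by_cases he : e = 'H'
              · subst he
                have hfeas : pvFeasB prev ('H' :: '.' :: 'H' :: t3)
                    = pvFeasB (some 'H') t3 := by
                  simp [pvFeasB]
                have hpat : pvPatterns ('H' :: '.' :: 'H' :: t3)
                    = 1 + pvPatterns t3 := by simp [pvPatterns]
                rw [hfeas, hpat]
                simp [pvCountH]
                split <;> omega
              · have hfeas : pvFeasB prev ('H' :: '.' :: e :: t3)
                    = pvFeasB (some e) t3 := by
                  simp [pvFeasB, he]
                rw [hfeas, pat_Hdot_ne e t3 he]
                simp [pvCountH, he]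
                split <;> omega
          · by_cases hp : prev = some '.'
            · have hlen : (d :: t2).length ≤ n := by simp at hl ⊢; omega
              have hrec := ih (d :: t2) hlen (some 'H') (b + 1)
              rw [show pvLoopA prev ('H' :: d :: t2) b
                    = pvLoopA (some 'H') (d :: t2) (b + 1) by
                    rw [pvLoopA.eq_def]; simp [hd, hp]]
              rw [hrec]
              have hfeas : pvFeasB prev ('H' :: d :: t2)
                  = pvFeasB (some 'H') (d :: t2) := by
                simp [pvFeasB, hp]
              have hpat : pvPatterns ('H' :: d :: t2) = pvPatterns (d :: t2) :=
                pat_H_nodot _ (by simpa using hd)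
              rw [hfeas, hpat]
              simp [pvCountH]
              split <;> omega
            · have : pvFeasB prev ('H' :: d :: t2) = false := by
                simp [pvFeasB, hp, hd]
              rw [this]
              rw [pvLoopA.eq_def]; simp [hd, hp]
      · have hlen : t.length ≤ n := by simp at hl; omega
        have hrec := ih t hlen (some c) b
        rw [show pvLoopA prev (c :: t) b = pvLoopA (some c) t b by
              rw [pvLoopA.eq_def]; simp [hc]]
        rw [hrec]
        have hfeas : pvFeasB prev (c :: t) = pvFeasB (some c) t := by
          simp [pvFeasB, hc]
        rw [hfeas, show pvCountH (c :: t) = pvCountH t by simp [pvCountH, hc],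
            pat_cons_ne c t hc]

-- ===== VERDICT (by name: the statement is the Claim_ definition above) =====
theorem minimum_food_buckets_spec : Claim_equal_minimum_food_buckets := by
  intro hamsters _
  unfold Spec_minimum_food_buckets minimum_food_buckets minimum_food_buckets_alt
  rw [pvKeyAux hamsters.toList.length hamsters.toList le_rfl none 0]
  split <;> simp
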